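-- pv_equiv track=rewrite | github.com/apdn7/AnalysisPlatform | histview2/common/services/csv_header_wrapr.py | add_suffix_if_duplicated
-- ===== SOURCE A (Python) =====
-- from collections import Counter
-- from itertools import tee
--
-- def add_suffix_if_duplicated(x):
--     duplicated = [k for k, v in Counter(x).items() if v > 1]
--     if len(duplicated) == 0:
--         return x
--     suffix_format = (f'_{str(x).zfill(2)!s}' for x in range(1, 100))
--     dic_suffix = dict(zip(duplicated, tee(suffix_format, len(duplicated))))
--     for idx, s in enumerate(x):
--         try:
--             suffix = str(next(dic_suffix[s]))
--         except KeyError: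
--             continue
--         else:
--             x[idx] += suffix
--     return x
-- ===== SOURCE B (Python) =====
-- # Different decomposition: one grouping pass builds value -> list of indices,
-- # then duplicated groups are rewritten in place by position.
-- # Like A, mutates x in place and returns it (equivalence is about the return value).
-- def add_suffix_if_duplicated(x):
--     positions = {}
--     for i, v in enumerate(x):
--         positions.setdefault(v, []).append(i)
--     for v, idxs in positions.items():
--         if len(idxs) > 1:
--             for n, i in enumerate(idxs, 1):
--                 x[i] = v + '_%02d' % n
--     return x
-- ===== Notes on version B (the rewrite author's own statement) =====
-- stated objective: alternative
-- what changed: Replaces the Counter-plus-tee'd-suffix-generator dict and its single guarded pass with one grouping pass building a value->indices table, then a grouped pass that rewrites each duplicated value's occurrences by position (Pre_ excludes counts >= 100, where A's generator raises StopIteration).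
import Mathlib
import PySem

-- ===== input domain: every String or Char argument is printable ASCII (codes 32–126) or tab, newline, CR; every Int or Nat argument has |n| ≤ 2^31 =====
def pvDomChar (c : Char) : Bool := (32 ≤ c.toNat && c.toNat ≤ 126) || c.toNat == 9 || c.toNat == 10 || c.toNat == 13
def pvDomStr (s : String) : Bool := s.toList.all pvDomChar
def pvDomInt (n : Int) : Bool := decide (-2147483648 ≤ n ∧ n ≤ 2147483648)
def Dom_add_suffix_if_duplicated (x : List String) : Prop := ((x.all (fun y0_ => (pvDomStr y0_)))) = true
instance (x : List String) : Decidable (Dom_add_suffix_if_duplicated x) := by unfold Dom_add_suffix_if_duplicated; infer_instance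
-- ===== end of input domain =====

-- B replaces A's Counter + tee'd-suffix-generator dict and guarded single pass by a grouping
-- pass (value -> list of indices) followed by a grouped rewriting pass; same cost, different
-- decomposition. Both A and B mutate x in place in Python; the equivalence proved here is
-- about the return value.

-- ===== PORT A =====
-- f'_{str(n).zfill(2)!s}'
def pvZfill2 (n : Int) : String := "_" ++ PySem.Str.zfill (PySem.Int.toStr n) 2
-- the generator (f'_{…}' for x in range(1, 100)) as the list of its 99 values
def pvSuffixes : List String := (PySem.List.pyRange 1 100 1).map pvZfill2
-- the for-loop over enumerate(x): d maps each duplicated value to the consumed count of its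
-- tee'd iterator; 'next' on an exhausted iterator (count ≥ 99) raises StopIteration in Python:
-- pyGet? returns none there, the '.getD ""' total-izing guard is unreachable under Pre_.
def pvALoop : List String → PySem.Dict String Int → List String
  | [], _ => []
  | s :: rest, d =>
    match d.get? s with
    | none => s :: pvALoop rest d
    | some k => (s ++ (PySem.List.pyGet? pvSuffixes k).getD "") :: pvALoop rest (d.insert s (k + 1))

def add_suffix_if_duplicated (x : List String) : List String :=
  let duplicated : List String :=
    ((PySem.Dict.counter x).items.filter (fun p => 1 < p.2)).map Prod.fst
  if duplicated.length = 0 then x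
  else
    -- dict(zip(duplicated, tee(suffix_format, len(duplicated)))): each key gets its own
    -- independent iterator, i.e. consumed count 0
    let dic_suffix := PySem.Dict.ofList (duplicated.map (fun k => (k, (0 : Int))))
    pvALoop x dic_suffix

-- ===== PORT B =====
-- '_%02d' % n (n ≥ 1) is the same zero-padding primitive as A's f-string: B's port reuses pvZfill2
-- positions.setdefault(v, []).append(i) over enumerate(x)
def pvPositions (x : List String) : PySem.Dict String (List Nat) :=
  x.zipIdx.foldl (fun d p => d.modify p.1 [] (fun l => l ++ [p.2])) PySem.Dict.empty

def add_suffix_if_duplicated_alt (x : List String) : List String :=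
  (pvPositions x).items.foldl
    (fun arr p =>
      if 1 < p.2.length then
        p.2.zipIdx.foldl (fun arr q => arr.set q.1 (p.1 ++ pvZfill2 ((q.2 : Int) + 1))) arr
      else arr) x

-- ===== PRECONDITION & SPEC =====
-- Pre_ excludes exactly the inputs where some value occurs ≥ 100 times: there A's suffix
-- generator (range(1, 100)) is exhausted and 'next' raises StopIteration.
def Pre_add_suffix_if_duplicated (x : List String) : Prop := ∀ s ∈ x, x.count s ≤ 99
instance (x : List String) : Decidable (Pre_add_suffix_if_duplicated x) := by unfold Pre_add_suffix_if_duplicated; infer_instance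
def pvWitness_add_suffix_if_duplicated : List String := ["a", "b", "a"]

def Spec_add_suffix_if_duplicated (x : List String) (out : List String) : Prop := out = add_suffix_if_duplicated_alt x
instance (x : List String) (out : List String) : Decidable (Spec_add_suffix_if_duplicated x out) := by unfold Spec_add_suffix_if_duplicated; infer_instance

-- ===== CLAIM (what is proved, stated in full; the proofs are below) =====
def Claim_equal_add_suffix_if_duplicated : Prop := ∀ (x : List String), Dom_add_suffix_if_duplicated x → Pre_add_suffix_if_duplicated x → Spec_add_suffix_if_duplicated x (add_suffix_if_duplicated x)

-- ===== LEMMAS AND PROOFS =====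

-- the value both programs put at index j
def pvTarget (x : List String) (j : Nat) : Option String :=
  (x[j]?).map (fun s => if 1 < x.count s then s ++ pvZfill2 (((x.take j).count s : Int) + 1) else s)

theorem pvCount_take_lt (x : List String) (j : Nat) (s : String) (h : x[j]? = some s) :
    (x.take j).count s < x.count s := by
  have hj : j < x.length := by
    by_contra hc
    simp [List.getElem?_eq_none (by omega : x.length ≤ j)] at h
  have hx : x = x.take j ++ (x[j] :: x.drop (j+1)) := by
    rw [← List.drop_eq_getElem_cons hj, List.take_append_drop]
  have hv : x[j] = s := by
    have := List.getElem?_eq_getElem hj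
    rw [this] at h; exact Option.some.inj h
  conv_rhs => rw [hx]
  rw [List.count_append, List.count_cons]
  simp [hv]

theorem pvSuffix_get (k : Nat) (h : k < 99) :
    PySem.List.pyGet? pvSuffixes (k : Int) = some (pvZfill2 ((k : Int) + 1)) := by
  have hr : PySem.List.pyRange 1 100 1 = List.map (fun i : Nat => ((i : Int) + 1)) (List.range 99) := by decide
  rw [PySem.List.pyGet?_natCast]
  have hk : (List.range 99)[k]? = some k := by simp [h]
  simp only [pvSuffixes, hr, List.map_map, List.getElem?_map, hk, Option.map_some, Function.comp]

-- ---- A side ----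

theorem pvALoop_getElem? (l : List String) (d : PySem.Dict String Int)
    (P : String → Bool) (c : String → Int)
    (hd : ∀ s, d.get? s = if P s then some (c s) else none) (j : Nat) :
    (pvALoop l d)[j]? = (l[j]?).map
      (fun s => if P s then
          s ++ (PySem.List.pyGet? pvSuffixes (c s + ((l.take j).count s : Int))).getD ""
        else s) := by
  induction l generalizing d c j with
  | nil => simp [pvALoop]
  | cons s0 r ih =>
    have hnext : ∀ t, (if P s0 then d.insert s0 (c s0 + 1) else d).get? t =
        if P t then some ((fun t => if t = s0 then c t + 1 else c t) t) else none := by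
      intro t
      by_cases hts : t = s0
      · subst hts
        by_cases hp : P t
        · simp [hp, PySem.Dict.get?_insert_self]
        · simp [hp, hd t]
      · by_cases hp : P s0
        · simp [hp, PySem.Dict.get?_insert_of_ne d _ hts, hd t, hts]
        · simp [hp, hd t, hts]
    cases j with
    | zero =>
      cases hp : P s0 <;> simp [pvALoop, hd s0, hp]
    | succ j =>
      have step : pvALoop (s0 :: r) d =
          (if P s0 then s0 ++ (PySem.List.pyGet? pvSuffixes (c s0)).getD "" else s0) ::
            pvALoop r (if P s0 then d.insert s0 (c s0 + 1) else d) := by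
        cases hp : P s0 <;> simp [pvALoop, hd s0, hp]
      rw [step]
      simp only [List.getElem?_cons_succ]
      rw [ih _ _ hnext j]
      cases hr : r[j]? with
      | none => simp
      | some t =>
        simp only [Option.map_some]
        congr 1
        have hcount : ((s0 :: r).take (j+1)).count t =
            (r.take j).count t + (if s0 == t then 1 else 0) := by
          simp only [List.take_succ_cons, List.count_cons]
        rw [hcount]
        by_cases hp : P t
        · simp only [hp, if_pos]
          congr 2
          have h1 : (if t = s0 then c t + 1 else c t) = c t + (if (s0 == t) = true then 1 else 0) := by
            by_cases hts : t = s0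
            · subst hts; simp
            · have hf : (s0 == t) = false := beq_false_of_ne (Ne.symm hts)
              simp [hts, hf]
          rw [h1]
          push_cast
          ring_nf
        · simp [hp]

theorem pvFoldIns_get? (l : List String) (d : PySem.Dict String Int) (s : String) :
    ((l.map (fun k => (k, (0 : Int)))).foldl (fun d p => d.insert p.1 p.2) d).get? s =
      if s ∈ l then some 0 else d.get? s := by
  induction l generalizing d with
  | nil => simp
  | cons k r ih =>
    simp only [List.map_cons, List.foldl_cons, ih, PySem.Dict.get?_insert]
    by_cases hsr : s ∈ r
    · simp [hsr, List.mem_cons]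
    · by_cases hsk : s = k <;> simp [hsr, hsk]

theorem pvOfList_get? (l : List String) (s : String) :
    (PySem.Dict.ofList (l.map (fun k => (k, (0 : Int))))).get? s =
      if s ∈ l then some 0 else none := by
  have := pvFoldIns_get? l PySem.Dict.empty s
  simpa [PySem.Dict.ofList, PySem.Dict.update, PySem.Dict.get?_empty] using this

theorem pvDup_mem (x : List String) (s : String) :
    (s ∈ ((PySem.Dict.counter x).items.filter (fun p => 1 < p.2)).map Prod.fst) ↔
      1 < x.count s := by
  rw [PySem.Dict.items_counter, List.filter_map]
  simp only [List.map_map, List.mem_map, Function.comp]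
  constructor
  · rintro ⟨k, hk, rfl⟩
    have := List.of_mem_filter hk
    simp at this
    omega
  · intro h
    refine ⟨s, ?_, rfl⟩
    rw [List.mem_filter]
    constructor
    · rw [PySem.Set.mem_ofList]
      exact List.count_pos_iff.mp (by omega)
    · simp; omega

theorem pvA_getElem? (x : List String) (hPre : Pre_add_suffix_if_duplicated x) (j : Nat) :
    (add_suffix_if_duplicated x)[j]? = pvTarget x j := by
  unfold add_suffix_if_duplicated pvTarget
  set D := ((PySem.Dict.counter x).items.filter (fun p => 1 < p.2)).map Prod.fst with hD
  by_cases hlen : D.length = 0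
  · have hD0 : D = [] := List.length_eq_zero_iff.mp hlen
    have hnone : ∀ s, ¬ (1 < x.count s) := by
      intro s hs
      have := (pvDup_mem x s).mpr hs
      rw [← hD, hD0] at this
      simp at this
    simp only [hlen, if_pos]
    cases hx : x[j]? with
    | none => simp
    | some s => simp [hnone s]
  · simp only [hlen, if_neg, if_false]
    have hd : ∀ s, (PySem.Dict.ofList (D.map (fun k => (k, (0 : Int))))).get? s =
        if (decide (1 < x.count s)) then some ((fun _ : String => (0:Int)) s) else none := by
      intro s
      rw [pvOfList_get?]
      by_cases hs : 1 < x.count s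
      · have hm : s ∈ D := by rw [hD]; exact (pvDup_mem x s).mpr hs
        simp [hs, hm]
      · have : s ∉ D := fun hm => hs ((pvDup_mem x s).mp (by rw [hD] at hm; exact hm))
        simp [hs, this]
    rw [pvALoop_getElem? x _ _ _ hd j]
    cases hx : x[j]? with
    | none => simp
    | some s =>
      simp only [Option.map_some]
      by_cases hs : 1 < x.count s
      · have hmem : s ∈ x := List.mem_of_getElem? hx
        have hk : (x.take j).count s < 99 := by
          have := pvCount_take_lt x j s hx
          have := hPre s hmem
          omega
        have h0 : (0 : Int) + ((x.take j).count s : Int) = (((x.take j).count s : Nat) : Int) := by ring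
        rw [h0, pvSuffix_get _ hk]
        simp [hs]
      · simp [hs]

-- ---- B side ----

-- indices (offset n) at which v occurs
def pvPos (n : Nat) (x : List String) (v : String) : List Nat :=
  (x.zipIdx n).filterMap (fun p => if p.1 = v then some p.2 else none)

theorem pvPos_cons (n : Nat) (s : String) (r : List String) (v : String) :
    pvPos n (s :: r) v = (if s = v then [n] else []) ++ pvPos (n + 1) r v := by
  simp only [pvPos, List.zipIdx_cons, List.filterMap_cons]
  split <;> simp_all

theorem pvPos_length (n : Nat) (x : List String) (v : String) :
    (pvPos n x v).length = x.count v := by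
  induction x generalizing n with
  | nil => simp [pvPos]
  | cons s r ih =>
    rw [pvPos_cons, List.length_append, ih, List.count_cons]
    by_cases h : s = v
    · simp [h]; omega
    · simp [h, beq_false_of_ne h]

theorem pvPos_mem (n : Nat) (x : List String) (v : String) (j : Nat) (h : j ∈ pvPos n x v) :
    ∃ k, k < x.length ∧ j = n + k ∧ x[k]? = some v := by
  induction x generalizing n with
  | nil => simp [pvPos] at h
  | cons s r ih =>
    rw [pvPos_cons] at h
    rcases List.mem_append.mp h with h1 | h2
    · refine ⟨0, by simp, ?_, ?_⟩
      · by_cases hs : s = v <;> simp [hs] at h1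
        omega
      · by_cases hs : s = v <;> simp [hs] at h1 ⊢
    · obtain ⟨k, hk, hj, hv⟩ := ih (n+1) h2
      exact ⟨k + 1, by simpa using hk, by omega, by simpa using hv⟩

theorem pvPos_ge (n : Nat) (x : List String) (v : String) (j : Nat) (h : j ∈ pvPos n x v) :
    n ≤ j := by
  obtain ⟨k, _, hj, _⟩ := pvPos_mem n x v j h
  omega

theorem pvPos_nodup (n : Nat) (x : List String) (v : String) : (pvPos n x v).Nodup := by
  induction x generalizing n with
  | nil => simp [pvPos]
  | cons s r ih =>
    rw [pvPos_cons]
    by_cases hs : s = v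
    · simp only [hs, if_pos rfl]
      refine List.Nodup.append (by simp) (ih (n+1)) ?_
      intro a ha hb
      simp at ha
      have := pvPos_ge _ r v _ hb
      omega
    · simp [hs, ih (n+1)]

theorem pvPos_rank (x : List String) (v : String) (j : Nat) (n : Nat) (h : x[j]? = some v) :
    (pvPos n x v)[(x.take j).count v]? = some (n + j) := by
  induction x generalizing n j with
  | nil => simp at h
  | cons s r ih =>
    cases j with
    | zero =>
      simp at h
      rw [pvPos_cons]
      simp [h]
    | succ j =>
      simp only [List.getElem?_cons_succ] at h
      rw [pvPos_cons]
      have hcnt : ((s :: r).take (j+1)).count v = (r.take j).count v + (if s == v then 1 else 0) := by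
        simp only [List.take_succ_cons, List.count_cons]
      rw [hcnt]
      by_cases hs : s = v
      · simp only [hs, if_pos rfl, beq_self_eq_true]
        simpa [Nat.add_assoc, Nat.add_comm 1 j] using ih (j := j) (n := n+1) h
      · simp only [hs, if_neg, beq_false_of_ne hs]
        simpa [Nat.add_assoc, Nat.add_comm 1 j] using ih (j := j) (n := n+1) h

theorem pvModFold_getD (pairs : List (String × Nat)) (d : PySem.Dict String (List Nat)) (v : String) :
    (pairs.foldl (fun d p => d.modify p.1 [] (fun l => l ++ [p.2])) d).getD v [] =
      d.getD v [] ++ pairs.filterMap (fun p => if p.1 = v then some p.2 else none) := by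
  induction pairs generalizing d with
  | nil => simp
  | cons p r ih =>
    simp only [List.foldl_cons, ih, List.filterMap_cons]
    by_cases hv : p.1 = v
    · rw [hv, PySem.Dict.getD_modify_self]
      simp [hv]
    · rw [PySem.Dict.getD_modify_of_ne d [] _ (fun h => hv h.symm)]
      simp [hv]

theorem pvPositions_getD (x : List String) (v : String) :
    (pvPositions x).getD v [] = pvPos 0 x v := by
  rw [pvPositions, pvModFold_getD]
  simp [pvPos, PySem.Dict.getD_empty]

theorem pvZipIdx_fst {α : Type} (l : List α) (n : Nat) : (l.zipIdx n).map Prod.fst = l := by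
  induction l generalizing n with
  | nil => simp
  | cons s r ih => simp [List.zipIdx_cons, ih]

theorem pvZipIdx_fst_nodup (l : List Nat) (h : l.Nodup) (n : Nat) :
    ((l.zipIdx n).map Prod.fst).Nodup := by
  rw [pvZipIdx_fst]; exact h

theorem pvPositions_keys (x : List String) : (pvPositions x).keys = PySem.Set.ofList x := by
  rw [pvPositions, PySem.Dict.keys_foldl_modify_key x.zipIdx Prod.fst [] (fun _ p l => l ++ [p.2])]
  rw [pvZipIdx_fst]
  simp [PySem.Dict.keys_empty, PySem.Set.update, PySem.Set.ofList]

theorem pvPositions_keys_nodup (x : List String) : (pvPositions x).keys.Nodup := by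
  rw [pvPositions_keys]; exact PySem.Set.nodup_ofList x

theorem pvPositions_items (x : List String) (p : String × List Nat)
    (h : p ∈ (pvPositions x).items) : p.2 = pvPos 0 x p.1 := by
  obtain ⟨k, l⟩ := p
  have hg : (pvPositions x).get? k = some l :=
    PySem.Dict.get?_of_mem_items _ h (pvPositions_keys_nodup x)
  have := PySem.Dict.getD_of_get?_eq_some _ ([] : List Nat) hg
  rw [pvPositions_getD] at this
  simpa using this.symm

theorem pvSetFold_length (ps : List (Nat × Nat)) (f : Nat → String) (arr : List String) :
    (ps.foldl (fun a q => a.set q.1 (f q.2)) arr).length = arr.length := by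
  induction ps generalizing arr with
  | nil => rfl
  | cons q r ih => simp [ih]

theorem pvSetFold_getElem? (ps : List (Nat × Nat)) (f : Nat → String) (arr : List String)
    (hmem : ∀ q ∈ ps, q.1 < arr.length) (hnd : (ps.map Prod.fst).Nodup) (j : Nat) :
    (ps.foldl (fun a q => a.set q.1 (f q.2)) arr)[j]? =
      match ps.find? (fun q => q.1 == j) with
      | some q => some (f q.2)
      | none => arr[j]? := by
  induction ps generalizing arr with
  | nil => simp
  | cons q r ih =>
    simp only [List.foldl_cons]
    have hlen : (arr.set q.1 (f q.2)).length = arr.length := by simp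
    have hmem' : ∀ p ∈ r, p.1 < (arr.set q.1 (f q.2)).length := by
      intro p hp; rw [hlen]; exact hmem p (List.mem_cons_of_mem q hp)
    rw [ih (arr.set q.1 (f q.2)) hmem' (by simpa using hnd.of_cons)]
    by_cases hq : q.1 = j
    · have hfind : (q :: r).find? (fun p => p.1 == j) = some q := by
        simp [List.find?_cons, hq]
      rw [hfind]
      have hrnone : r.find? (fun p => p.1 == j) = none := by
        rw [List.find?_eq_none]
        intro p hp hbe
        have : p.1 = j := by simpa using hbe
        have hnotin : q.1 ∉ r.map Prod.fst := by
          simpa using (List.nodup_cons.mp hnd).1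
        exact hnotin (by rw [hq, ← this]; exact List.mem_map_of_mem hp)
      rw [hrnone]
      rw [List.getElem?_set]
      simp only [hq, if_pos rfl]
      have := hmem q List.mem_cons_self
      simp [hq ▸ this]
    · have hfind : (q :: r).find? (fun p => p.1 == j) = r.find? (fun p => p.1 == j) := by
        simp [List.find?_cons, hq]
      rw [hfind]
      cases hrf : r.find? (fun p => p.1 == j) with
      | some p => simp
      | none =>
        simp only
        rw [List.getElem?_set]
        simp [hq]

theorem pvFst_uniq {α : Type} (ps : List (Nat × α)) (hnd : (ps.map Prod.fst).Nodup)
    (p q : Nat × α) (hp : p ∈ ps) (hq : q ∈ ps) (h : p.1 = q.1) : p = q := by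
  induction ps with
  | nil => simp at hp
  | cons a r ih =>
    simp only [List.map_cons, List.nodup_cons] at hnd
    rcases List.mem_cons.mp hp with rfl | hp' <;> rcases List.mem_cons.mp hq with rfl | hq'
    · rfl
    · exact absurd (h ▸ List.mem_map_of_mem (f := Prod.fst) hq') hnd.1
    · exact absurd (h.symm ▸ List.mem_map_of_mem (f := Prod.fst) hp') hnd.1
    · exact ih hnd.2 hp' hq'

def pvStep (arr : List String) (p : String × List Nat) : List String :=
  if 1 < p.2.length then
    p.2.zipIdx.foldl (fun arr q => arr.set q.1 (p.1 ++ pvZfill2 ((q.2 : Int) + 1))) arr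
  else arr

theorem pvStep_length (arr : List String) (p : String × List Nat) :
    (pvStep arr p).length = arr.length := by
  unfold pvStep
  split
  · exact pvSetFold_length p.2.zipIdx (fun m => p.1 ++ pvZfill2 ((m : Int) + 1)) arr
  · rfl

theorem pvStep_getElem? (x : List String) (arr : List String) (hlen : arr.length = x.length)
    (v : String) (j : Nat) (s : String) (hj : x[j]? = some s) :
    (pvStep arr (v, pvPos 0 x v))[j]? =
      if v = s ∧ 1 < x.count s then some (s ++ pvZfill2 (((x.take j).count s : Int) + 1))
      else arr[j]? := by
  have hmem : ∀ q ∈ (pvPos 0 x v).zipIdx, q.1 < arr.length := by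
    intro q hq
    have : q.1 ∈ pvPos 0 x v := by
      rw [← pvZipIdx_fst (pvPos 0 x v) 0]
      exact List.mem_map_of_mem hq
    obtain ⟨k, hk, hjk, _⟩ := pvPos_mem 0 x v q.1 this
    omega
  unfold pvStep
  by_cases hdup : 1 < (pvPos 0 x v).length
  · simp only [hdup, if_pos, if_true]
    rw [pvSetFold_getElem? (pvPos 0 x v).zipIdx (fun m => v ++ pvZfill2 ((m : Int) + 1)) arr hmem (pvZipIdx_fst_nodup _ (pvPos_nodup 0 x v) 0) j]
    by_cases hvs : v = s
    · subst hvs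
      have hrank := pvPos_rank x v j 0 hj
      have hzmem : ((j, (x.take j).count v) : Nat × Nat) ∈ (pvPos 0 x v).zipIdx := by
        have := List.getElem?_zipIdx (l := pvPos 0 x v) (i := 0) (j := (x.take j).count v)
        rw [hrank] at this
        simp only [Option.map_some, Nat.zero_add] at this
        exact List.mem_of_getElem? this
      have hcnt : 1 < x.count v := by
        rw [← pvPos_length 0 x v]; exact hdup
      have hfind : ∃ q, (pvPos 0 x v).zipIdx.find? (fun q => q.1 == j) = some q := by
        rcases hfs : (pvPos 0 x v).zipIdx.find? (fun q => q.1 == j) with _ | q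
        · rw [List.find?_eq_none] at hfs
          exact absurd (by simp : (((j, (x.take j).count v) : Nat × Nat).1 == j) = true)
            (hfs _ hzmem)
        · exact ⟨q, hfs⟩
      obtain ⟨q, hq⟩ := hfind
      have hqmem := List.mem_of_find?_eq_some hq
      have hqj : q.1 = j := by simpa using List.find?_some hq
      have : q = (j, (x.take j).count v) :=
        pvFst_uniq _ (pvZipIdx_fst_nodup _ (pvPos_nodup 0 x v) 0) q _ hqmem hzmem (by simpa using hqj)
      rw [hq, this]
      simp [hcnt]
    · have hnone : (pvPos 0 x v).zipIdx.find? (fun q => q.1 == j) = none := by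
        rw [List.find?_eq_none]
        intro q hq hbe
        have hq1 : q.1 = j := by simpa using hbe
        have : q.1 ∈ pvPos 0 x v := by
          rw [← pvZipIdx_fst (pvPos 0 x v) 0]
          exact List.mem_map_of_mem hq
        obtain ⟨k, hk, hjk, hv⟩ := pvPos_mem 0 x v q.1 this
        rw [Nat.zero_add] at hjk
        rw [← hjk, hq1, hj] at hv
        exact hvs (Option.some.inj hv).symm
      rw [hnone]
      simp [hvs]
  · have hcnt : ¬ 1 < x.count v := by rw [← pvPos_length 0 x v]; exact hdup
    simp only [hdup, if_neg, if_false]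
    by_cases hvs : v = s
    · subst hvs
      simp [hcnt]
    · simp [hvs]

theorem pvOuterFold (x : List String) (items : List (String × List Nat)) (arr : List String)
    (hlen : arr.length = x.length)
    (hnd : (items.map Prod.fst).Nodup)
    (hit : ∀ p ∈ items, p.2 = pvPos 0 x p.1)
    (j : Nat) (s : String) (hj : x[j]? = some s) :
    (items.foldl pvStep arr)[j]? =
      if s ∈ items.map Prod.fst ∧ 1 < x.count s
      then some (s ++ pvZfill2 (((x.take j).count s : Int) + 1))
      else arr[j]? := by
  induction items generalizing arr with
  | nil => simp
  | cons p r ih =>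
    obtain ⟨v, idxs⟩ := p
    have hidxs : idxs = pvPos 0 x v := hit (v, idxs) List.mem_cons_self
    subst hidxs
    simp only [List.foldl_cons]
    have hlen' : (pvStep arr (v, pvPos 0 x v)).length = x.length := by
      rw [pvStep_length]; exact hlen
    rw [ih _ hlen' (by simpa using hnd.of_cons) (fun p hp => hit p (List.mem_cons_of_mem _ hp))]
    rw [pvStep_getElem? x arr hlen v j s hj]
    by_cases hr : s ∈ r.map Prod.fst ∧ 1 < x.count s
    · simp [hr, List.mem_cons, hr.1, hr.2]
    · by_cases hvs : v = s
      · by_cases hc : 1 < x.count s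
        · simp [hr, hvs, hc]
        · simp [hvs, hc, hr]
      · have hsv : ¬ s = v := fun h => hvs h.symm
        rw [if_neg hr, if_neg (fun h : v = s ∧ 1 < x.count s => hvs h.1), if_neg ?_]
        rintro ⟨h1, h2⟩
        rcases List.mem_cons.mp h1 with h | h
        · exact hsv h
        · exact hr ⟨h, h2⟩

theorem pvB_length (x : List String) : (add_suffix_if_duplicated_alt x).length = x.length := by
  unfold add_suffix_if_duplicated_alt
  have : ∀ (items : List (String × List Nat)) (arr : List String),
      (items.foldl pvStep arr).length = arr.length := by
    intro items
    induction items with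
    | nil => intro arr; rfl
    | cons p r ih => intro arr; rw [List.foldl_cons, ih (pvStep arr p), pvStep_length]
  exact this _ x

theorem pvB_getElem? (x : List String) (j : Nat) :
    (add_suffix_if_duplicated_alt x)[j]? = pvTarget x j := by
  by_cases hj : j < x.length
  · have hx : x[j]? = some x[j] := List.getElem?_eq_getElem hj
    have hB : add_suffix_if_duplicated_alt x = (pvPositions x).items.foldl pvStep x := rfl
    rw [hB, pvOuterFold x _ x rfl
      (by have := pvPositions_keys_nodup x; simpa [PySem.Dict.keys] using this)
      (fun p hp => pvPositions_items x p hp) j x[j] hx]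
    have hkeys : x[j] ∈ (pvPositions x).items.map Prod.fst := by
      have : x[j] ∈ PySem.Set.ofList x := by
        rw [PySem.Set.mem_ofList]
        exact List.getElem_mem hj
      rw [← pvPositions_keys x] at this
      simpa [PySem.Dict.keys] using this
    unfold pvTarget
    rw [hx]
    simp only [Option.map_some]
    by_cases hc : 1 < x.count x[j]
    · simp [hkeys, hc, pvZfill2, pvZfill2]
    · simp [hc]
  · have h1 : (add_suffix_if_duplicated_alt x).length ≤ j := by rw [pvB_length]; omega
    rw [List.getElem?_eq_none h1]
    unfold pvTarget
    rw [List.getElem?_eq_none (by omega : x.length ≤ j)]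
    simp

-- ===== VERDICT (by name: the statement is the Claim_ definition above) =====
theorem add_suffix_if_duplicated_spec : Claim_equal_add_suffix_if_duplicated := by
  intro x _ hPre
  unfold Spec_add_suffix_if_duplicated
  refine (List.ext_getElem? ?_)
  intro j
  rw [pvA_getElem? x hPre j, pvB_getElem? x j]
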